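-- pv_equiv track=rewrite | github.com/choss001/python_algorithm | programmars/greedy/paint_override_161989.py | solution
-- ===== SOURCE A (Python) =====
-- def solution(n, m, section):
--
--     count = 0
--     end = 99999999
--     for i in range(len(section)):
--         start = i
--         end = start + m - 1
--         if start >= end :
--             continue
--         end = start + m - 1
--         if end > n :
--             count +=1
--             break
--         count +=1
--     return count
-- ===== SOURCE B (Python) =====
-- def solution(n, m, section):
--     L = len(section)
--     if m <= 1 or L == 0:
--         return 0
--     return min(L, max(0, n - m + 2) + 1)
-- ===== Notes on version B (the rewrite author's own statement) =====
-- stated objective: simpler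
-- what changed: Replaced the counting loop with a closed-form formula: the break happens at index max(0, n-m+2), so the count is min(len(section), max(0, n-m+2)+1), with 0 for m<=1 or empty section.
import Mathlib
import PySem

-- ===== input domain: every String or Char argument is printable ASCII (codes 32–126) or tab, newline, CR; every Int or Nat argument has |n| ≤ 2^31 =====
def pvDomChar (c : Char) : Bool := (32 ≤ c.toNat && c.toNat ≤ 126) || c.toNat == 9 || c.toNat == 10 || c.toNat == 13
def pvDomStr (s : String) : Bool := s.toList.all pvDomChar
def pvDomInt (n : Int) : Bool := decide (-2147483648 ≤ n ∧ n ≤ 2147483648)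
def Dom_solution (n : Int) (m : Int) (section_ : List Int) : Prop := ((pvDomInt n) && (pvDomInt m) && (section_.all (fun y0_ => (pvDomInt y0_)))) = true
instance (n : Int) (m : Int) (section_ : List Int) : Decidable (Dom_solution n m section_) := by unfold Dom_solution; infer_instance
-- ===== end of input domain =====

-- B replaces A's counting loop by a closed-form formula (objective: simpler).

-- ===== PORT A =====
-- loop of A: walks range(len(section)), state = count; returns early on break
def solutionLoop (n : Int) (m : Int) : List Int → Int → Int
  | [], count => count
  | i :: rest, count =>
    let start := i
    let end_ := start + m - 1
    if start ≥ end_ then solutionLoop n m rest count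
    else if start + m - 1 > n then count + 1
    else solutionLoop n m rest (count + 1)

def solution (n : Int) (m : Int) (section_ : List Int) : Int :=
  solutionLoop n m (PySem.List.pyRange 0 (section_.length : Int) 1) 0

-- ===== PORT B =====
def solution_alt (n : Int) (m : Int) (section_ : List Int) : Int :=
  if m ≤ 1 ∨ (section_.length : Int) = 0 then 0
  else min (section_.length : Int) (max 0 (n - m + 2) + 1)

-- ===== PRECONDITION & SPEC =====
def Spec_solution (n : Int) (m : Int) (section_ : List Int) (out : Int) : Prop := out = solution_alt n m section_
instance (n : Int) (m : Int) (section_ : List Int) (out : Int) : Decidable (Spec_solution n m section_ out) := by unfold Spec_solution; infer_instance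

-- ===== CLAIM (what is proved, stated in full; the proofs are below) =====
def Claim_equal_solution : Prop := ∀ (n : Int) (m : Int) (section_ : List Int), Dom_solution n m section_ → Spec_solution n m section_ (solution n m section_)

-- ===== LEMMAS AND PROOFS =====

-- ===== VERDICT (by name: the statement is the Claim_ definition above) =====
-- closed form for A's loop on a consecutive range, when m > 1
theorem solutionLoop_range (n m : Int) (hm : 1 < m) :
    ∀ (k : Nat) (a c : Int),
      solutionLoop n m (PySem.List.pyRange a (a + k) 1) c
        = c + min (k : Int) (max 0 (n - m + 2 - a) + 1) := by
  intro k
  induction k with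
  | zero =>
    intro a c
    rw [show a + ((0:Nat):Int) = a by simp, PySem.List.pyRange_one_eq_nil le_rfl]
    show c = c + min ((0:Nat):Int) (max 0 (n - m + 2 - a) + 1)
    omega
  | succ k ih =>
    intro a c
    rw [PySem.List.pyRange_one_cons (by push_cast; omega)]
    show (if a ≥ a + m - 1 then _ else if a + m - 1 > n then _ else _) = _
    rw [if_neg (by omega)]
    by_cases hb : a + m - 1 > n
    · rw [if_pos hb]; omega
    · rw [if_neg hb]
      have : a + 1 + (k : Int) = a + ((k : Nat) + 1 : Nat) := by push_cast; omega
      rw [show (a:Int) + ((Nat.succ k : Nat) : Int) = (a + 1) + (k : Nat) by push_cast; omega]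
      rw [ih (a + 1) (c + 1)]
      omega

theorem solution_spec : Claim_equal_solution := by
  intro n m section_ _
  unfold Spec_solution solution solution_alt
  by_cases hm : 1 < m
  · have h := solutionLoop_range n m hm section_.length 0 0
    rw [show (0:Int) + (section_.length : Int) = (section_.length : Int) by ring] at h
    rw [h]
    split_ifs with h0
    · rcases h0 with h0 | h0 <;> omega
    · omega
  · -- m ≤ 1: every iteration hits 'continue', count stays 0
    have : ∀ (l : List Int) (c : Int), solutionLoop n m l c = c := by
      intro l
      induction l with
      | nil => intro c; rfl
      | cons i rest ih =>
        intro c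
        show (if i ≥ i + m - 1 then _ else _) = _
        rw [if_pos (by omega)]
        exact ih c
    rw [this]
    rw [if_pos (Or.inl (by omega))]
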